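-- pv_equiv track=rewrite | github.com/ICOS-Carbon-Portal/jupyter | notebooks/education/MSc_BSc/etc_nrt_ngen14/eco_tool/gui.py | _var_tup2station_dict
-- ===== SOURCE A (Python) =====
-- def _var_tup2station_dict(var_tuples: list = None):
--     """
--     var_tuple: list of tuples
--         Each tuple is of the form
--             (variable, file, station)
--
--      Returns
--      a dictionary of the form
--
--     """
--     station_dict = {}
--     for v_tuple in var_tuples:
--         st = v_tuple[-1]
--         prod = v_tuple[-2]
--         var = v_tuple[0]
--         if st in station_dict.keys():
--             if prod in station_dict[st].keys():
--                 station_dict[st][prod].append(var)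
--             else:
--                 station_dict[st][prod] = [var]
--         else:
--             station_dict[st] = {prod: [var]}
--     return station_dict
-- ===== SOURCE B (Python) =====
-- def _var_tup2station_dict(var_tuples: list = None):
--     stations = list(dict.fromkeys(t[-1] for t in var_tuples))
--     station_dict = {}
--     for st in stations:
--         group = [t for t in var_tuples if t[-1] == st]
--         prods = list(dict.fromkeys(t[-2] for t in group))
--         station_dict[st] = {p: [t[0] for t in group if t[-2] == p] for p in prods}
--     return station_dict
-- ===== Notes on version B (the rewrite author's own statement) =====
-- stated objective: alternative
-- what changed: Replaces A's single pass of nested-dict membership tests and in-place inserts/appends with a group-by decomposition: dedup the stations first, then for each station filter its tuples, dedup its products, and build each product's variable list by a filtering comprehension.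
import Mathlib
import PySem

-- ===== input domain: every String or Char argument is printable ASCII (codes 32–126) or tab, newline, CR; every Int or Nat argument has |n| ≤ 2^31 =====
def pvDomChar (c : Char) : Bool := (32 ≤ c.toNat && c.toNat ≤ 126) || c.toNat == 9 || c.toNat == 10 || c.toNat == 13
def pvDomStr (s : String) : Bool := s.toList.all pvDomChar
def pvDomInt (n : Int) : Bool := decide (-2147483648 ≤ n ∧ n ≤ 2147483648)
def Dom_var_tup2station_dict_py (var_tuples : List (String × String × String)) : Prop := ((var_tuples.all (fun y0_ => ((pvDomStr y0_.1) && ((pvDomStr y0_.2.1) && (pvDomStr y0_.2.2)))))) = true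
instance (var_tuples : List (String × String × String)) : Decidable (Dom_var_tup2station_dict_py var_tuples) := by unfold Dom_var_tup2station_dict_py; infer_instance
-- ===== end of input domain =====

-- B regroups by first deduplicating the stations, then filtering each station's tuples and
-- deduplicating its products (an "alternative" group-by decomposition instead of A's
-- one-pass nested-dict insertion); both return the same nested association lists.

-- ===== PORT A =====
-- one loop iteration of A: branch on station membership, then on product membership
def pvStepA (d : PySem.Dict String (PySem.Dict String (List String)))
    (t : String × String × String) : PySem.Dict String (PySem.Dict String (List String)) :=
  let st := t.2.2
  let prod := t.2.1
  let var := t.1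
  if d.contains st then
    let inner := d.getD st PySem.Dict.empty     -- station_dict[st]; st is known present
    if inner.contains prod then
      -- station_dict[st][prod].append(var): in-place append, position preserved
      d.insert st (inner.insert prod (inner.getD prod [] ++ [var]))
    else
      d.insert st (inner.insert prod [var])
  else
    d.insert st ((PySem.Dict.empty : PySem.Dict String (List String)).insert prod [var])

def var_tup2station_dict_py (var_tuples : List (String × String × String)) :
    List (String × List (String × List String)) :=
  ((var_tuples.foldl pvStepA PySem.Dict.empty).items.map (fun p => (p.1, p.2.items)))

-- ===== PORT B =====
-- inner dict comprehension of B: {p: [t[0] for t in group if t[-2] == p] for p in prods}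
def pvGroupProducts (group : List (String × String × String)) : List (String × List String) :=
  (PySem.List.dedup (group.map (fun t => t.2.1))).map
    (fun p => (p, (group.filter (fun t => t.2.1 == p)).map (fun t => t.1)))

def var_tup2station_dict_py_alt (var_tuples : List (String × String × String)) :
    List (String × List (String × List String)) :=
  let stations := PySem.List.dedup (var_tuples.map (fun t => t.2.2))
  let sd := stations.foldl
    (fun d st =>
      d.insert st (PySem.Dict.ofList (pvGroupProducts (var_tuples.filter (fun t => t.2.2 == st)))))
    (PySem.Dict.empty : PySem.Dict String (PySem.Dict String (List String)))
  sd.items.map (fun p => (p.1, p.2.items))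

-- ===== PRECONDITION & SPEC =====
def Spec_var_tup2station_dict_py (var_tuples : List (String × String × String)) (out : List (String × List (String × List String))) : Prop := out = var_tup2station_dict_py_alt var_tuples
instance (var_tuples : List (String × String × String)) (out : List (String × List (String × List String))) : Decidable (Spec_var_tup2station_dict_py var_tuples out) := by unfold Spec_var_tup2station_dict_py; infer_instance

-- ===== CLAIM (what is proved, stated in full; the proofs are below) =====
def Claim_equal_var_tup2station_dict_py : Prop := ∀ (var_tuples : List (String × String × String)), Dom_var_tup2station_dict_py var_tuples → Spec_var_tup2station_dict_py var_tuples (var_tup2station_dict_py var_tuples)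

-- ===== LEMMAS AND PROOFS =====

-- the common normal form both ports are reduced to
def pvCanon (vt : List (String × String × String)) : List (String × List (String × List String)) :=
  (PySem.List.dedup (vt.map (fun t => t.2.2))).map
    (fun s => (s, pvGroupProducts (vt.filter (fun t => t.2.2 == s))))

-- pvStepA with its lets zeta-reduced, for rewriting only the outer application
lemma pvStepA_apply (d : PySem.Dict String (PySem.Dict String (List String))) (v p s : String) :
    pvStepA d (v, p, s) =
      if d.contains s = true then
        (if (d.getD s PySem.Dict.empty).contains p = true then
          d.insert s ((d.getD s PySem.Dict.empty).insert p
            ((d.getD s PySem.Dict.empty).getD p [] ++ [v]))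
        else d.insert s ((d.getD s PySem.Dict.empty).insert p [v]))
      else d.insert s ((PySem.Dict.empty : PySem.Dict String (List String)).insert p [v]) := rfl

lemma pv_nodup_keys_foldlA (vt : List (String × String × String))
    (d : PySem.Dict String (PySem.Dict String (List String))) (h : d.keys.Nodup) :
    (vt.foldl pvStepA d).keys.Nodup := by
  induction vt generalizing d with
  | nil => exact h
  | cons t vt ih =>
    apply ih
    obtain ⟨v, p, s⟩ := t
    rw [pvStepA_apply]
    split_ifs <;> exact PySem.Dict.nodup_keys_insert _ _ _ h

lemma pv_items_ofList {ν : Type} (L : List (String × ν)) (h : (L.map Prod.fst).Nodup) :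
    (PySem.Dict.ofList L).items = L := by
  unfold PySem.Dict.ofList PySem.Dict.update
  rw [PySem.Dict.items_foldl_insert_fresh L Prod.fst Prod.snd PySem.Dict.empty
    (fun a _ => PySem.Dict.contains_empty _) h]
  have he : (PySem.Dict.empty : PySem.Dict String ν).items = [] := rfl
  rw [he]
  simp

lemma pv_nodup_fst_pvGroupProducts (g : List (String × String × String)) :
    ((pvGroupProducts g).map Prod.fst).Nodup := by
  unfold pvGroupProducts
  rw [List.map_map]
  simp [Function.comp_def]

lemma pv_alt_eq_canon (vt : List (String × String × String)) :
    var_tup2station_dict_py_alt vt = pvCanon vt := by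
  unfold var_tup2station_dict_py_alt pvCanon
  dsimp only
  rw [PySem.Dict.items_foldl_insert_fresh (PySem.List.dedup (vt.map (fun t => t.2.2)))
    (fun st => st)
    (fun st => PySem.Dict.ofList (pvGroupProducts (vt.filter (fun t => t.2.2 == st))))
    PySem.Dict.empty (fun a _ => PySem.Dict.contains_empty _)
    (by simp [PySem.List.dedup])]
  have he : (PySem.Dict.empty : PySem.Dict String (PySem.Dict String (List String))).items = [] := rfl
  rw [he, List.nil_append, List.map_map]
  apply List.map_congr_left
  intro s _
  simp only [Function.comp_def]
  rw [pv_items_ofList _ (pv_nodup_fst_pvGroupProducts _)]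

lemma pv_A_eq_canon (vt : List (String × String × String)) :
    ((vt.foldl pvStepA PySem.Dict.empty).items.map (fun p => (p.1, p.2.items))) = pvCanon vt := by
  induction vt using List.reverseRecOn with
  | nil => rfl
  | append_singleton vt t ih =>
    obtain ⟨v, p, s⟩ := t
    rw [List.foldl_append, List.foldl_cons, List.foldl_nil, pvStepA_apply]
    have hnd : (vt.foldl pvStepA PySem.Dict.empty).keys.Nodup :=
      pv_nodup_keys_foldlA vt _ PySem.Dict.nodup_keys_empty
    have hkeys : (vt.foldl pvStepA PySem.Dict.empty).keys
        = PySem.Set.ofList (vt.map (fun t => t.2.2)) := by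
      have h1 : (vt.foldl pvStepA PySem.Dict.empty).keys
          = ((vt.foldl pvStepA PySem.Dict.empty).items.map
              (fun p => (p.1, p.2.items))).map Prod.fst := by
        simp [PySem.Dict.keys, List.map_map, Function.comp_def]
      rw [h1, ih]
      simp [pvCanon, List.map_map, Function.comp_def, PySem.List.dedup]
    have hmapkey : (vt ++ [(v, p, s)]).map (fun t => t.2.2)
        = vt.map (fun t => t.2.2) ++ [s] := by simp
    by_cases hs : (vt.foldl pvStepA PySem.Dict.empty).contains s = true
    · -- station s already present
      rw [if_pos hs]
      have hsmem : s ∈ PySem.Set.ofList (vt.map (fun t => t.2.2)) := by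
        rw [← hkeys]; exact (PySem.Dict.contains_iff_mem_keys _ _).mp hs
      -- the inner dict of s holds exactly pvGroupProducts of s's group
      have hsg : (s, pvGroupProducts (vt.filter (fun t => t.2.2 == s))) ∈ pvCanon vt := by
        unfold pvCanon
        exact List.mem_map_of_mem hsmem
      rw [← ih] at hsg
      obtain ⟨q, hqmem, hqeq⟩ := List.mem_map.mp hsg
      have hq1 : q.1 = s := congrArg Prod.fst hqeq
      have hq2 : q.2.items = pvGroupProducts (vt.filter (fun t => t.2.2 == s)) :=
        congrArg Prod.snd hqeq
      have hgetD : (vt.foldl pvStepA PySem.Dict.empty).getD s PySem.Dict.empty = q.2 := by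
        apply PySem.Dict.getD_of_mem_items _ _ hnd
        rw [← hq1]; exact hqmem
      have hinner : ((vt.foldl pvStepA PySem.Dict.empty).getD s PySem.Dict.empty).items
          = pvGroupProducts (vt.filter (fun t => t.2.2 == s)) := by rw [hgetD, hq2]
      have hinnerkeys : ((vt.foldl pvStepA PySem.Dict.empty).getD s PySem.Dict.empty).keys
          = PySem.Set.ofList ((vt.filter (fun t => t.2.2 == s)).map (fun t => t.2.1)) := by
        simp [PySem.Dict.keys, hinner, pvGroupProducts, List.map_map, Function.comp_def,
          PySem.List.dedup]
      have hinnernd : ((vt.foldl pvStepA PySem.Dict.empty).getD s PySem.Dict.empty).keys.Nodup := by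
        rw [hinnerkeys]; exact PySem.Set.nodup_ofList _
      have hfil : (vt ++ [(v, p, s)]).filter (fun t => t.2.2 == s)
          = vt.filter (fun t => t.2.2 == s) ++ [(v, p, s)] := by
        simp [List.filter_append]
      have step1 : ∀ (L : List (String × PySem.Dict String (List String)))
          (NI : PySem.Dict String (List String)),
          (L.map (fun q => if (q.1 == s) = true then (s, NI) else q)).map
            (fun r => (r.1, r.2.items))
          = (L.map (fun r => (r.1, r.2.items))).map
            (fun r => if (r.1 == s) = true then (s, NI.items) else r) := by
        intro L NI
        simp only [List.map_map]
        apply List.map_congr_left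
        intro q _
        by_cases h : q.1 = s <;> simp [h]
      by_cases hp : ((vt.foldl pvStepA PySem.Dict.empty).getD s PySem.Dict.empty).contains p = true
      · -- product p already present in s's inner dict
        rw [if_pos hp]
        have hpmem : p ∈ PySem.Set.ofList
            ((vt.filter (fun t => t.2.2 == s)).map (fun t => t.2.1)) := by
          rw [← hinnerkeys]; exact (PySem.Dict.contains_iff_mem_keys _ _).mp hp
        have hpgetD : ((vt.foldl pvStepA PySem.Dict.empty).getD s PySem.Dict.empty).getD p []
            = ((vt.filter (fun t => t.2.2 == s)).filter (fun t => t.2.1 == p)).map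
                (fun t => t.1) := by
          apply PySem.Dict.getD_of_mem_items _ _ hinnernd
          rw [hinner]
          unfold pvGroupProducts
          exact List.mem_map_of_mem hpmem
        rw [PySem.Dict.items_insert_of_contains _ _ hs]
        rw [step1, ih]
        rw [PySem.Dict.items_insert_of_contains _ _ hp, hpgetD, hinner]
        unfold pvCanon
        rw [hmapkey]
        unfold PySem.List.dedup
        rw [PySem.Set.ofList_append_singleton, PySem.Set.add_of_mem hsmem, List.map_map]
        apply List.map_congr_left
        intro s' hs'
        by_cases h : s' = s
        · subst h
          simp only [Function.comp_def, beq_self_eq_true, if_pos]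
          rw [hfil]
          unfold pvGroupProducts
          have hmp : ((vt.filter (fun t => t.2.2 == s')) ++ [(v, p, s')]).map (fun t => t.2.1)
              = (vt.filter (fun t => t.2.2 == s')).map (fun t => t.2.1) ++ [p] := by simp
          rw [hmp]
          unfold PySem.List.dedup
          rw [PySem.Set.ofList_append_singleton, PySem.Set.add_of_mem hpmem, List.map_map]
          refine congrArg (fun L => (s', L)) ?_
          apply List.map_congr_left
          intro p' _
          by_cases hpp : p' = p
          · subst hpp
            simp [List.filter_append]
          · have hb : (p' == p) = false := by simp [hpp]
            have hne : (p == p') = false := by simp [Ne.symm hpp]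
            simp only [Function.comp_def, hb, Bool.false_eq_true, if_false, List.filter_append]
            simp [hne]
        · have hb : (s' == s) = false := by simp [h]
          have hne : (s == s') = false := by simp [Ne.symm h]
          simp only [Function.comp_def, hb, Bool.false_eq_true, if_false, List.filter_append]
          simp [hne]
      · -- product p new in s's inner dict
        rw [if_neg hp]
        have hpF : ((vt.foldl pvStepA PySem.Dict.empty).getD s PySem.Dict.empty).contains p
            = false := Bool.not_eq_true _ |>.mp hp
        have hpnot : p ∉ (vt.filter (fun t => t.2.2 == s)).map (fun t => t.2.1) := by
          intro hmem
          apply hp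
          rw [PySem.Dict.contains_iff_mem_keys, hinnerkeys]
          exact (PySem.Set.mem_ofList _ _).mpr hmem
        rw [PySem.Dict.items_insert_of_contains _ _ hs]
        rw [step1, ih]
        rw [PySem.Dict.items_insert_of_not_contains _ _ hpF, hinner]
        unfold pvCanon
        rw [hmapkey]
        unfold PySem.List.dedup
        rw [PySem.Set.ofList_append_singleton, PySem.Set.add_of_mem hsmem, List.map_map]
        apply List.map_congr_left
        intro s' hs'
        by_cases h : s' = s
        · subst h
          simp only [Function.comp_def, beq_self_eq_true, if_pos]
          rw [hfil]
          unfold pvGroupProducts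
          have hmp : ((vt.filter (fun t => t.2.2 == s')) ++ [(v, p, s')]).map (fun t => t.2.1)
              = (vt.filter (fun t => t.2.2 == s')).map (fun t => t.2.1) ++ [p] := by simp
          rw [hmp]
          unfold PySem.List.dedup
          rw [PySem.Set.ofList_append_singleton,
            PySem.Set.add_of_not_mem (fun hm => hpnot ((PySem.Set.mem_ofList _ _).mp hm)),
            List.map_append]
          refine congrArg (fun L => (s', L)) ?_
          congr 1
          · apply List.map_congr_left
            intro p' hp'
            have hpp : p' ≠ p := by
              intro he; subst he
              exact hpnot ((PySem.Set.mem_ofList _ _).mp hp')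
            have hne : (p == p') = false := by simp [Ne.symm hpp]
            simp [List.filter_append, hne]
          · simp [List.filter_append]
            intro a a1 b hmem h1 h2
            subst h1; subst h2
            exact hpnot (List.mem_map.mpr ⟨(a, a1, b), List.mem_filter.mpr ⟨hmem, by simp⟩, rfl⟩)
        · have hb : (s' == s) = false := by simp [h]
          have hne : (s == s') = false := by simp [Ne.symm h]
          simp only [Function.comp_def, hb, Bool.false_eq_true, if_false, List.filter_append]
          simp [hne]
    · -- station s new
      rw [if_neg hs]
      have hsF : (vt.foldl pvStepA PySem.Dict.empty).contains s = false :=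
        Bool.not_eq_true _ |>.mp hs
      have hsnot : s ∉ vt.map (fun t => t.2.2) := by
        intro hmem
        apply hs
        rw [PySem.Dict.contains_iff_mem_keys, hkeys]
        exact (PySem.Set.mem_ofList _ _).mpr hmem
      rw [PySem.Dict.items_insert_of_not_contains _ _ hsF, List.map_append, ih]
      unfold pvCanon
      rw [hmapkey]
      unfold PySem.List.dedup
      rw [PySem.Set.ofList_append_singleton,
        PySem.Set.add_of_not_mem (fun hm => hsnot ((PySem.Set.mem_ofList _ _).mp hm)),
        List.map_append]
      have hfilnil : vt.filter (fun t => t.2.2 == s) = [] := by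
        apply List.filter_eq_nil_iff.mpr
        intro a ha
        simp only [beq_iff_eq]
        intro has
        exact hsnot (List.mem_map.mpr ⟨a, ha, has⟩)
      congr 1
      · apply List.map_congr_left
        intro s' hs'
        have hss' : s' ≠ s := by
          intro h; subst h
          exact hsnot ((PySem.Set.mem_ofList _ _).mp hs')
        have hne : (s == s') = false := by simp [Ne.symm hss']
        simp [List.filter_append, hne]
      · simp only [List.map_cons, List.map_nil, List.filter_append, hfilnil, List.nil_append]
        have hD : ((PySem.Dict.empty : PySem.Dict String (List String)).insert p [v]).items
            = [(p, [v])] := by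
          rw [PySem.Dict.items_insert_of_not_contains _ _ (PySem.Dict.contains_empty _)]
          rfl
        rw [hD]
        simp [pvGroupProducts, PySem.List.dedup, PySem.Set.ofList]

-- ===== VERDICT (by name: the statement is the Claim_ definition above) =====
theorem var_tup2station_dict_py_spec : Claim_equal_var_tup2station_dict_py := by
  intro vt _
  unfold Spec_var_tup2station_dict_py
  rw [pv_alt_eq_canon]
  unfold var_tup2station_dict_py
  exact pv_A_eq_canon vt
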